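-- pv_equiv track=rewrite | github.com/mmercalde/prng_cluster_public | patch_watcher_dispatch.py | apply_cli_args_patch
-- ===== SOURCE A (Python) =====
-- CLI_ARGS_PATCH = """
--     # Phase 7 Part B: Dispatch commands
--     parser.add_argument('--dispatch-selfplay', action='store_true',
--                         help='Dispatch selfplay orchestrator')
--     parser.add_argument('--dispatch-learning-loop', type=str, nargs='?',
--                         const='steps_3_5_6', metavar='SCOPE',
--                         help='Dispatch learning loop (default: steps_3_5_6)')
--     parser.add_argument('--process-requests', action='store_true',
--                         help='Process pending watcher_requests/*.json')
--     parser.add_argument('--dry-run', action='store_true',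
--                         help='Dry run (log actions without executing)')
-- """
--
-- def apply_cli_args_patch(content: str) -> str:
--     """Add new CLI arguments after the last existing add_argument call."""
--     # Find the last parser.add_argument line before parse_args
--     lines = content.split('\n')
--     last_add_arg_idx = -1
--     for i, line in enumerate(lines):
--         if 'add_argument' in line and 'parser' in line:
--             last_add_arg_idx = i
--         # Stop at parse_args
--         if 'parse_args' in line:
--             break
--
--     if last_add_arg_idx == -1:
--         raise RuntimeError("Could not find parser.add_argument lines")
--
--     lines.insert(last_add_arg_idx + 1, CLI_ARGS_PATCH)
--     return '\n'.join(lines)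
-- ===== SOURCE B (Python) =====
-- CLI_ARGS_PATCH = """
--     # Phase 7 Part B: Dispatch commands
--     parser.add_argument('--dispatch-selfplay', action='store_true',
--                         help='Dispatch selfplay orchestrator')
--     parser.add_argument('--dispatch-learning-loop', type=str, nargs='?',
--                         const='steps_3_5_6', metavar='SCOPE',
--                         help='Dispatch learning loop (default: steps_3_5_6)')
--     parser.add_argument('--process-requests', action='store_true',
--                         help='Process pending watcher_requests/*.json')
--     parser.add_argument('--dry-run', action='store_true',
--                         help='Dry run (log actions without executing)')
-- """
--
-- def apply_cli_args_patch(content: str) -> str: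
--     """Add new CLI arguments after the last existing add_argument call."""
--     lines = content.split('\n')
--     # Cutoff: the first line mentioning parse_args (inclusive); whole file if absent.
--     cutoff = len(lines) - 1
--     for i, line in enumerate(lines):
--         if 'parse_args' in line:
--             cutoff = i
--             break
--     # Scan backward from the cutoff for the last parser.add_argument line.
--     idx = None
--     j = cutoff
--     while j >= 0:
--         if 'add_argument' in lines[j] and 'parser' in lines[j]:
--             idx = j
--             break
--         j -= 1
--     if idx is None:
--         raise RuntimeError("Could not find parser.add_argument lines")
--     return '\n'.join(lines[:idx + 1] + [CLI_ARGS_PATCH] + lines[idx + 1:])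
-- ===== Notes on version B (the rewrite author's own statement) =====
-- stated objective: alternative
-- what changed: B first fixes the parse_args cutoff line, then scans backward from it for the last parser.add_argument line and splices the patch in by list slicing, instead of A's single forward pass that carries a last-match accumulator and breaks at parse_args.
-- outside the precondition, e.g. on apply_cli_args_patch('parser'): A raises RuntimeError, B raises RuntimeError; on apply_cli_args_patch('add_argument'): A raises RuntimeError, B raises RuntimeError; on apply_cli_args_patch('parse_args'): A raises RuntimeError, B raises RuntimeError
import Mathlib
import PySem

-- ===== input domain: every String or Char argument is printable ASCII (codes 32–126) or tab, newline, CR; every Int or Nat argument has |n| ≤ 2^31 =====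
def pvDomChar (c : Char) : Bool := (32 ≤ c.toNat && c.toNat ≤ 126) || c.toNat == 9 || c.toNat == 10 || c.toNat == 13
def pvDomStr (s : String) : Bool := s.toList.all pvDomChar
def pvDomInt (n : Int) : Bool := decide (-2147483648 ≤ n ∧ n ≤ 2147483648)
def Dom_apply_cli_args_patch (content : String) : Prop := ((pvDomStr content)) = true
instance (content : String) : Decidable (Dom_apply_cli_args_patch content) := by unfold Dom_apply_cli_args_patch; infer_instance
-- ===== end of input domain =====

-- B re-decomposes A: it first fixes the parse_args cutoff line, then scans BACKWARD from it
-- for the last parser.add_argument line and splices the patch in by list slicing, instead of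
-- A's single forward pass that carries a last-match accumulator and breaks at parse_args.
-- Objective: alternative decomposition (no speed claim).

def pvCLI_ARGS_PATCH : String := "\n    # Phase 7 Part B: Dispatch commands\n    parser.add_argument('--dispatch-selfplay', action='store_true',\n                        help='Dispatch selfplay orchestrator')\n    parser.add_argument('--dispatch-learning-loop', type=str, nargs='?',\n                        const='steps_3_5_6', metavar='SCOPE',\n                        help='Dispatch learning loop (default: steps_3_5_6)')\n    parser.add_argument('--process-requests', action='store_true',\n                        help='Process pending watcher_requests/*.json')\n    parser.add_argument('--dry-run', action='store_true',\n                        help='Dry run (log actions without executing)')\n"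

-- substring tests, the same 'in' expressions in both Pythons
def pvP (l : String) : Bool := PySem.Str.isIn "add_argument" l && PySem.Str.isIn "parser" l
def pvQ (l : String) : Bool := PySem.Str.isIn "parse_args" l

-- ===== PORT A =====
def pvALoop : List String → Nat → Int → Int
  | [], _, acc => acc
  | l :: rest, i, acc =>
    let acc' := if pvP l then (i : Int) else acc
    if pvQ l then acc' else pvALoop rest (i + 1) acc'

def apply_cli_args_patch (content : String) : String :=
  let lines := (PySem.Str.split? content "\n").getD []   -- sep ≠ "", so split? is always some
  let idx := pvALoop lines 0 (-1)
  if idx = -1 then content  -- here the Python raises RuntimeError; excluded by Pre_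
  else PySem.Str.join "\n" (PySem.List.insert lines (idx + 1) pvCLI_ARGS_PATCH)

-- ===== PORT B =====
def pvBScan (lines : List String) : Nat → Option Nat
  | 0 => if pvP (lines.getD 0 "") then some 0 else none
  | j + 1 => if pvP (lines.getD (j + 1) "") then some (j + 1) else pvBScan lines j

def apply_cli_args_patch_alt (content : String) : String :=
  let lines := (PySem.Str.split? content "\n").getD []   -- sep ≠ "", so split? is always some
  let cutoff := (lines.findIdx? pvQ).getD (lines.length - 1)
  match pvBScan lines cutoff with
  | some k => PySem.Str.join "\n" (lines.take (k + 1) ++ pvCLI_ARGS_PATCH :: lines.drop (k + 1))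
  | none => content  -- here the Python raises RuntimeError; excluded by Pre_

-- ===== PRECONDITION & SPEC =====
-- Pre_ excludes exactly the inputs with no 'parser'+'add_argument' line at or before the first
-- 'parse_args' line: there both Pythons raise RuntimeError.
def Pre_apply_cli_args_patch (content : String) : Prop :=
  ((List.range (((((PySem.Str.split? content "\n").getD []).findIdx? pvQ).getD
        (((PySem.Str.split? content "\n").getD []).length - 1)) + 1)).any
    (fun i => pvP (((PySem.Str.split? content "\n").getD []).getD i ""))) = true

instance (content : String) : Decidable (Pre_apply_cli_args_patch content) := by
  unfold Pre_apply_cli_args_patch; infer_instance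

def pvWitness_apply_cli_args_patch : String := "parser.add_argument('--x')"

def Spec_apply_cli_args_patch (content : String) (out : String) : Prop := out = apply_cli_args_patch_alt content
instance (content : String) (out : String) : Decidable (Spec_apply_cli_args_patch content out) := by unfold Spec_apply_cli_args_patch; infer_instance

-- ===== CLAIM (what is proved, stated in full; the proofs are below) =====
def Claim_equal_apply_cli_args_patch : Prop := ∀ (content : String), Dom_apply_cli_args_patch content → Pre_apply_cli_args_patch content → Spec_apply_cli_args_patch content (apply_cli_args_patch content)

-- ===== LEMMAS AND PROOFS =====

-- proof-only helpers
def pvStep (acc : Int) (p : String × Nat) : Int := if pvP p.1 then (p.2 : Int) else acc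

def pvProc (rest : List String) : Nat :=
  match rest.findIdx? pvQ with
  | some q => q + 1
  | none => rest.length

theorem pvALoop_eq_foldl (rest : List String) : ∀ (k : Nat) (acc : Int),
    pvALoop rest k acc = ((rest.take (pvProc rest)).zipIdx k).foldl pvStep acc := by
  induction rest with
  | nil => intro k acc; simp [pvALoop, pvProc]
  | cons l rest ih =>
    intro k acc
    by_cases hq : pvQ l = true
    · simp [pvALoop, pvProc, List.findIdx?_cons, hq, pvStep]
    · have hproc : pvProc (l :: rest) = pvProc rest + 1 := by
        simp only [pvProc, List.findIdx?_cons, hq]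
        cases h : rest.findIdx? pvQ <;> simp [List.length_cons]
      rw [hproc]
      simp only [pvALoop, hq, List.take_succ_cons, List.zipIdx_cons, List.foldl_cons]
      rw [ih]
      rfl

theorem pvBScan_eq_foldl (lines : List String) : ∀ (j : Nat), j < lines.length →
    (match pvBScan lines j with | some k => (k : Int) | none => -1)
      = ((lines.take (j + 1)).zipIdx 0).foldl pvStep (-1) := by
  intro j
  induction j with
  | zero =>
    intro h
    obtain ⟨l0, rest, rfl⟩ : ∃ l0 rest, lines = l0 :: rest := by
      cases lines with
      | nil => simp at h
      | cons a t => exact ⟨a, t, rfl⟩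
    simp only [pvBScan, List.getD, List.getElem?_cons_zero, Option.getD_some,
      List.take_succ_cons, List.take_zero, List.zipIdx_cons, List.zipIdx_nil,
      List.foldl_cons, List.foldl_nil, pvStep]
    by_cases hp : pvP l0 = true <;> simp [hp]
  | succ j ih =>
    intro h
    have hj : j < lines.length := Nat.lt_of_succ_lt h
    have hget : lines[j + 1]? = some lines[j + 1] := List.getElem?_eq_getElem h
    have hgetD : lines.getD (j + 1) "" = lines[j + 1] := by
      simp [List.getD, hget]
    have htake : lines.take (j + 1 + 1) = lines.take (j + 1) ++ [lines[j + 1]] := by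
      rw [List.take_add_one, hget]; rfl
    have hlen : (lines.take (j + 1)).length = j + 1 := List.length_take_of_le (by omega)
    rw [htake, List.zipIdx_append, List.foldl_append, hlen]
    simp only [List.zipIdx_cons, List.zipIdx_nil, List.foldl_cons, List.foldl_nil, Nat.zero_add]
    simp only [pvBScan, hgetD]
    by_cases hp : pvP lines[j + 1] = true
    · simp [hp, pvStep]
    · simp only [hp, pvStep]
      exact ih hj

theorem pvBScan_some (lines : List String) : ∀ (j k : Nat),
    pvBScan lines j = some k → pvP (lines.getD k "") = true ∧ k ≤ j := by
  intro j
  induction j with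
  | zero =>
    intro k h
    simp only [pvBScan] at h
    split_ifs at h with hp
    · cases h; exact ⟨hp, le_refl _⟩
  | succ j ih =>
    intro k h
    simp only [pvBScan] at h
    split_ifs at h with hp
    · cases h; exact ⟨hp, le_refl _⟩
    · obtain ⟨h1, h2⟩ := ih k h
      exact ⟨h1, Nat.le_succ_of_le h2⟩

theorem pvP_lt_length (lines : List String) (k : Nat) (h : pvP (lines.getD k "") = true) :
    k < lines.length := by
  by_contra hk
  have hnone : lines[k]? = none := List.getElem?_eq_none (Nat.le_of_not_lt hk)
  have hgd : lines.getD k "" = "" := by simp [List.getD, hnone]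
  rw [hgd] at h
  exact absurd h (by decide)

theorem pvBScan_nil : ∀ (j : Nat), pvBScan ([] : List String) j = none := by
  intro j
  induction j with
  | zero => decide
  | succ j ih => simp [pvBScan, List.getD, ih]; decide

theorem core_eq (content : String) (lines : List String) :
    (if pvALoop lines 0 (-1) = -1 then content
     else PySem.Str.join "\n" (PySem.List.insert lines (pvALoop lines 0 (-1) + 1) pvCLI_ARGS_PATCH))
    = (match pvBScan lines ((lines.findIdx? pvQ).getD (lines.length - 1)) with
       | some k => PySem.Str.join "\n" (lines.take (k + 1) ++ pvCLI_ARGS_PATCH :: lines.drop (k + 1))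
       | none => content) := by
  rcases Nat.eq_zero_or_pos lines.length with h0 | hlen
  · obtain rfl : lines = [] := List.eq_nil_of_length_eq_zero h0
    rw [pvBScan_nil]
    simp [pvALoop]
  · have hcutlt : (lines.findIdx? pvQ).getD (lines.length - 1) < lines.length := by
      cases hf : lines.findIdx? pvQ with
      | none => simp only [Option.getD_none]; omega
      | some q =>
        simp only [Option.getD_some]
        obtain ⟨hq, -⟩ := List.findIdx?_eq_some_iff_getElem.mp hf
        exact hq
    have hproc : pvProc lines = (lines.findIdx? pvQ).getD (lines.length - 1) + 1 := by
      rw [pvProc]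
      cases hf : lines.findIdx? pvQ with
      | none => simp only [Option.getD_none]; omega
      | some q => simp only [Option.getD_some]
    have hA : pvALoop lines 0 (-1)
        = (match pvBScan lines ((lines.findIdx? pvQ).getD (lines.length - 1)) with
           | some k => (k : Int) | none => -1) := by
      rw [pvALoop_eq_foldl, hproc, ← pvBScan_eq_foldl lines _ hcutlt]
    rw [hA]
    cases hb : pvBScan lines ((lines.findIdx? pvQ).getD (lines.length - 1)) with
    | none => simp
    | some k =>
      obtain ⟨hP, hk⟩ := pvBScan_some lines _ k hb
      have hklt : k < lines.length := pvP_lt_length lines k hP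
      have hne1 : (k : Int) ≠ -1 := by omega
      simp only [hne1]
      have hcast : (k : Int) + 1 = ((k + 1 : Nat) : Int) := by push_cast; ring
      rw [hcast, PySem.List.insert_natCast lines (k + 1) pvCLI_ARGS_PATCH (by omega)]
      rfl

theorem main_eq (content : String) :
    apply_cli_args_patch content = apply_cli_args_patch_alt content := by
  unfold apply_cli_args_patch apply_cli_args_patch_alt
  exact core_eq content ((PySem.Str.split? content "\n").getD [])

-- ===== VERDICT (by name: the statement is the Claim_ definition above) =====
theorem apply_cli_args_patch_spec : Claim_equal_apply_cli_args_patch := by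
  intro content _ _
  unfold Spec_apply_cli_args_patch
  exact main_eq content
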